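-- pv_equiv track=rewrite | github.com/jodie9779/Python-Portfolio | Varsity Code/Challenge 4/task4.py | number_of_days_to_save
-- ===== SOURCE A (Python) =====
-- def number_of_days_to_save(moneysaved):
--     decimalpoints = str(moneysaved)[::-1].find('.')
--     try:
--         moneysaved = int(moneysaved)
--     except ValueError:
--         return -1
--     if moneysaved < 0:
--         return -1
--     elif moneysaved > 74926:
--         return -1
--     elif decimalpoints > 2:
--         return -1
--     else:
--         totalmoney = 0
--         week = 1
--         day = 0
--         while totalmoney < moneysaved:
--             if day % 7 == 0 and day != 0:
--                 week +=1
--                 day = 0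
--             totalmoney += week + day
--             day += 1
--         daysneeded = 7 * (week - 1) + day
--         return daysneeded
-- ===== SOURCE B (Python) =====
-- def number_of_days_to_save(moneysaved):
--     try:
--         m = int(moneysaved)
--     except ValueError:
--         return -1
--     if m < 0 or m > 74926:
--         return -1
--     # total saved after `days` days in closed form: q full weeks plus r extra days
--     def saved(days):
--         q = days // 7
--         r = days % 7
--         return 7 * q * (q + 1) // 2 + 21 * q + r * (q + 1) + r * (r - 1) // 2
--     # binary search for the least number of days whose closed-form savings reach m
--     hi = 1
--     while saved(hi) < m:
--         hi *= 2
--     lo = 0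
--     while lo < hi:
--         mid = (lo + hi) // 2
--         if saved(mid) >= m:
--             hi = mid
--         else:
--             lo = mid + 1
--     return lo
-- ===== Notes on version B (the rewrite author's own statement) =====
-- stated objective: faster
-- what changed: A simulates the deposits day by day until the target is reached; B replaces the simulation by a closed-form formula for the total saved after d days (full-week triangular sum plus a partial-week term) and binary-searches (with an exponential gallop for the upper bound) for the least d whose closed-form savings reach the target.
import Mathlib
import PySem

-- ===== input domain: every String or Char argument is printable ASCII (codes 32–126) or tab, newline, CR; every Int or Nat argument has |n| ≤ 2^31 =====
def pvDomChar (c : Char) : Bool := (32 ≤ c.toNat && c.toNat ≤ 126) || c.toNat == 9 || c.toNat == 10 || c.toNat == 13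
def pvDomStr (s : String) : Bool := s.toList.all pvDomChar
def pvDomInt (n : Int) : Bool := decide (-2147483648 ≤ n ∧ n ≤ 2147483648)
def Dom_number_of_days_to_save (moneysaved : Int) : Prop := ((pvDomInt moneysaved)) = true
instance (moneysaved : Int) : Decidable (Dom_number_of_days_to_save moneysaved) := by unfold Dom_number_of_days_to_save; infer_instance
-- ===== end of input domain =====

-- B replaces A's day-by-day deposit simulation by a closed-form savings formula plus a
-- galloping binary search for the least sufficient day count (asymptotically faster).


-- ===== PORT A =====
-- A's while-loop, state (totalmoney, week, day); the proof arguments (week ≥ 1, day ≥ 0) are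
-- invariants of A's loop, carried only so that Lean accepts termination (each iteration adds
-- week + day ≥ 1 to totalmoney).
def loopA (m total week day : Int) (hw : 1 ≤ week) (hd : 0 ≤ day) : Int :=
  if total < m then
    if PySem.Int.mod day 7 = 0 ∧ day ≠ 0 then
      -- week += 1; day = 0; then totalmoney += week + day; day += 1
      loopA m (total + ((week + 1) + 0)) (week + 1) (0 + 1) (by omega) (by omega)
    else
      loopA m (total + (week + day)) week (day + 1) hw (by omega)
  else 7 * (week - 1) + day
termination_by (m - total).toNat
decreasing_by
  · omega
  · omega

def number_of_days_to_save (moneysaved : Int) : Int :=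
  -- decimalpoints = str(moneysaved)[::-1].find('.')   (slice? with step -1 is always some)
  let decimalpoints : Int :=
    PySem.Str.find ((PySem.Str.slice? (PySem.Int.toStr moneysaved) none none (-1)).getD "") "."
  -- int(moneysaved) on an int is the identity and never raises ValueError
  if moneysaved < 0 then -1
  else if moneysaved > 74926 then -1
  else if decimalpoints > 2 then -1
  else loopA moneysaved 0 1 0 (by norm_num) (by norm_num)

-- ===== PORT B =====
-- Source B's closed-form `saved(days)`: q full weeks plus r extra days (lets inlined)
def savedB (days : Int) : Int :=
  PySem.Int.floordiv (7 * PySem.Int.floordiv days 7 * (PySem.Int.floordiv days 7 + 1)) 2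
  + 21 * PySem.Int.floordiv days 7
  + PySem.Int.mod days 7 * (PySem.Int.floordiv days 7 + 1)
  + PySem.Int.floordiv (PySem.Int.mod days 7 * (PySem.Int.mod days 7 - 1)) 2

-- needed by the ports' termination only (cited in decreasing_by): each day deposits ≥ 1
theorem savedB_ge_self (d : Int) (hd : 0 ≤ d) : d ≤ savedB d := by
  have h7 : ∀ a : Int, PySem.Int.floordiv a 7 = a / 7 :=
    fun a => PySem.Int.floordiv_eq_ediv_of_pos (by norm_num)
  have h2 : ∀ a : Int, PySem.Int.floordiv a 2 = a / 2 :=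
    fun a => PySem.Int.floordiv_eq_ediv_of_pos (by norm_num)
  have hm7 : ∀ a : Int, PySem.Int.mod a 7 = a % 7 :=
    fun a => PySem.Int.mod_eq_emod_of_pos (by norm_num)
  simp only [savedB, h7, h2, hm7]
  have hq0 : 0 ≤ d / 7 := by omega
  have h1 : 0 ≤ 7 * (d / 7) * (d / 7 + 1) := by positivity
  have h1' : 0 ≤ 7 * (d / 7) * (d / 7 + 1) / 2 := Int.ediv_nonneg h1 (by norm_num)
  have h3 : 0 ≤ d % 7 * (d % 7 - 1) := by
    rcases (by omega : d % 7 = 0 ∨ 1 ≤ d % 7) with h | h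
    · simp [h]
    · have := mul_nonneg (by omega : (0:Int) ≤ d % 7) (by omega : (0:Int) ≤ d % 7 - 1)
      linarith
  have h3' : 0 ≤ d % 7 * (d % 7 - 1) / 2 := Int.ediv_nonneg h3 (by norm_num)
  have h4 : d % 7 ≤ d % 7 * (d / 7 + 1) := by nlinarith [Int.emod_nonneg d (by norm_num : (7:Int) ≠ 0)]
  omega

-- the galloping `while saved(hi) < m: hi *= 2` loop
def gallopB (m hi : Int) (h : 1 ≤ hi) : Int :=
  if savedB hi < m then gallopB m (hi * 2) (by omega) else hi
termination_by (m - hi).toNat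
decreasing_by
  have := savedB_ge_self hi (by omega)
  omega

-- the `while lo < hi` binary-search loop
def bsearchB (m lo hi : Int) : Int :=
  if h : lo < hi then
    if m ≤ savedB (PySem.Int.floordiv (lo + hi) 2) then
      bsearchB m lo (PySem.Int.floordiv (lo + hi) 2)
    else
      bsearchB m (PySem.Int.floordiv (lo + hi) 2 + 1) hi
  else lo
termination_by (hi - lo).toNat
decreasing_by
  · have hm : PySem.Int.floordiv (lo + hi) 2 = (lo + hi) / 2 :=
      PySem.Int.floordiv_eq_ediv_of_pos (by norm_num)
    omega
  · have hm : PySem.Int.floordiv (lo + hi) 2 = (lo + hi) / 2 :=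
      PySem.Int.floordiv_eq_ediv_of_pos (by norm_num)
    omega

def number_of_days_to_save_alt (moneysaved : Int) : Int :=
  -- int(moneysaved) on an int is the identity and never raises ValueError
  if moneysaved < 0 ∨ moneysaved > 74926 then -1
  else bsearchB moneysaved 0 (gallopB moneysaved 1 (by norm_num))

-- ===== PRECONDITION & SPEC =====
def Spec_number_of_days_to_save (moneysaved : Int) (out : Int) : Prop := out = number_of_days_to_save_alt moneysaved
instance (moneysaved : Int) (out : Int) : Decidable (Spec_number_of_days_to_save moneysaved out) := by unfold Spec_number_of_days_to_save; infer_instance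

-- ===== CLAIM (what is proved, stated in full; the proofs are below) =====
def Claim_equal_number_of_days_to_save : Prop := ∀ (moneysaved : Int), Dom_number_of_days_to_save moneysaved → Spec_number_of_days_to_save moneysaved (number_of_days_to_save moneysaved)

-- ===== LEMMAS AND PROOFS =====

-- str(int) contains no '.': its characters are a possible '-' and decimal digit characters
theorem digitChar_ne_dot (k : ℕ) (hk : k < 10) : Nat.digitChar k ≠ '.' := by
  interval_cases k <;> decide

theorem dot_not_mem_toDigitsCore (f : ℕ) : ∀ (n : ℕ) (ds : List Char),
    '.' ∉ ds → '.' ∉ Nat.toDigitsCore 10 f n ds := by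
  induction f with
  | zero => intro n ds hds; simpa [Nat.toDigitsCore] using hds
  | succ f ih =>
    intro n ds hds
    simp only [Nat.toDigitsCore]
    split
    · intro hmem
      rcases List.mem_cons.mp hmem with h | h
      · exact digitChar_ne_dot _ (Nat.mod_lt _ (by norm_num)) h.symm
      · exact hds h
    · refine ih _ _ ?_
      intro hmem
      rcases List.mem_cons.mp hmem with h | h
      · exact digitChar_ne_dot _ (Nat.mod_lt _ (by norm_num)) h.symm
      · exact hds h

theorem dot_not_mem_toChars (m : Int) : '.' ∉ PySem.Int.toChars m := by
  unfold PySem.Int.toChars Nat.toDigits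
  split
  · intro hmem
    rcases List.mem_cons.mp hmem with h | h
    · exact absurd h (by decide)
    · exact dot_not_mem_toDigitsCore _ _ _ (List.not_mem_nil) h
  · exact dot_not_mem_toDigitsCore _ _ _ (List.not_mem_nil)

-- A's decimalpoints is always -1 on an int argument
theorem decimalpoints_eq_neg_one (m : Int) :
    PySem.Str.find ((PySem.Str.slice? (PySem.Int.toStr m) none none (-1)).getD "") "." = -1 := by
  rw [PySem.Str.slice?_none_none_neg_one]
  simp only [Option.getD_some]
  rw [PySem.Str.find_eq_neg_one_iff]
  intro hinf
  have hmem : '.' ∈ (String.ofList (PySem.Int.toStr m).toList.reverse).toList := by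
    have hd : ('.' : Char) ∈ (".".toList : List Char) := by decide
    exact hinf.subset hd
  rw [String.toList_ofList, List.mem_reverse, PySem.Int.toList_toStr] at hmem
  exact dot_not_mem_toChars m hmem

-- the closed form steps by exactly one day's deposit
theorem savedB_succ (d : Int) (hd : 0 ≤ d) :
    savedB (d + 1) = savedB d + (d / 7 + 1 + d % 7) := by
  have h7 : ∀ a : Int, PySem.Int.floordiv a 7 = a / 7 :=
    fun a => PySem.Int.floordiv_eq_ediv_of_pos (by norm_num)
  have h2 : ∀ a : Int, PySem.Int.floordiv a 2 = a / 2 :=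
    fun a => PySem.Int.floordiv_eq_ediv_of_pos (by norm_num)
  have hm7 : ∀ a : Int, PySem.Int.mod a 7 = a % 7 :=
    fun a => PySem.Int.mod_eq_emod_of_pos (by norm_num)
  simp only [savedB, h7, h2, hm7]
  rcases (by omega : d % 7 = 6 ∨ d % 7 < 6) with h6 | h6
  · have e1 : (d + 1) / 7 = d / 7 + 1 := by omega
    have e2 : (d + 1) % 7 = 0 := by omega
    rw [e1, e2]
    have eq1 : 7 * (d / 7 + 1) * (d / 7 + 1 + 1) = 7 * (d / 7 * (d / 7 + 1)) + 14 * (d / 7 + 1) := by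
      ring
    have eq2 : 7 * (d / 7) * (d / 7 + 1) = 7 * (d / 7 * (d / 7 + 1)) := by ring
    rw [eq1, eq2, h6]
    have hx : d / 7 * (d / 7 + 1) % 2 = 0 := Int.even_iff.mp (Int.even_mul_succ_self _)
    generalize d / 7 * (d / 7 + 1) = x at hx ⊢
    omega
  · have e1 : (d + 1) / 7 = d / 7 := by omega
    have e2 : (d + 1) % 7 = d % 7 + 1 := by omega
    rw [e1, e2]
    have eq2 : 7 * (d / 7) * (d / 7 + 1) = 7 * (d / 7 * (d / 7 + 1)) := by ring
    rw [eq2]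
    generalize d / 7 * (d / 7 + 1) = x
    rcases (by omega : d % 7 = 0 ∨ d % 7 = 1 ∨ d % 7 = 2 ∨ d % 7 = 3 ∨ d % 7 = 4 ∨ d % 7 = 5)
      with h | h | h | h | h | h <;> rw [h] <;> omega

theorem savedB_mono : ∀ (n : ℕ) (a b : Int), 0 ≤ a → a ≤ b → (b - a).toNat ≤ n →
    savedB a ≤ savedB b := by
  intro n
  induction n with
  | zero =>
    intro a b ha hab hn
    have hab2 : a = b := by omega
    exact le_of_eq (by rw [hab2])
  | succ n ih =>
    intro a b ha hab hn
    rcases (by omega : a = b ∨ a + 1 ≤ b) with h | h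
    · exact le_of_eq (by rw [h])
    · have h1 := ih (a + 1) b (by omega) h (by omega)
      have h2 := savedB_succ a ha
      have : 0 ≤ a / 7 := by omega
      have : 0 ≤ a % 7 := by omega
      omega

-- the least D ≥ start with savedB D ≥ m (the value both programs compute)
def leastD (m D : Int) (hD : 0 ≤ D) : Int :=
  if m ≤ savedB D then D else leastD m (D + 1) (by omega)
termination_by (m - D).toNat
decreasing_by
  have := savedB_ge_self D hD
  omega

-- A's flat loop at state (savedB D, w, d), D = 7*(w-1)+d, computes leastD
theorem bridgeA : ∀ (n : ℕ) (m w d : Int) (hw : 1 ≤ w) (hd : 0 ≤ d), d ≤ 7 →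
    (m - savedB (7 * (w - 1) + d)).toNat ≤ n →
    loopA m (savedB (7 * (w - 1) + d)) w d hw hd
      = leastD m (7 * (w - 1) + d) (by omega) := by
  intro n
  induction n with
  | zero =>
    intro m w d hw hd hd7 hn
    have hge : m ≤ savedB (7 * (w - 1) + d) := by omega
    rw [loopA.eq_def, if_neg (by omega : ¬ savedB (7 * (w - 1) + d) < m),
      leastD.eq_def, if_pos hge]
  | succ n ih =>
    intro m w d hw hd hd7 hn
    by_cases hlt : savedB (7 * (w - 1) + d) < m
    · have hnle : ¬ m ≤ savedB (7 * (w - 1) + d) := by omega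
      rw [loopA.eq_def, if_pos hlt, leastD.eq_def, if_neg hnle]
      by_cases hc : PySem.Int.mod d 7 = 0 ∧ d ≠ 0
      · have h7 : d = 7 := by
          obtain ⟨h1, h2⟩ := hc
          unfold PySem.Int.mod at h1
          rw [Int.fmod_eq_emod] at h1
          simp at h1
          omega
        subst h7
        rw [if_pos hc]
        have hstep : savedB (7 * (w - 1) + 7) + ((w + 1) + 0) = savedB (7 * (w - 1) + 7 + 1) := by
          have h := savedB_succ (7 * (w - 1) + 7) (by omega)
          have e1 : (7 * (w - 1) + 7) / 7 = w := by omega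
          have e2 : (7 * (w - 1) + 7) % 7 = 0 := by omega
          rw [e1, e2] at h
          omega
        have hrec := ih m (w + 1) 1 (by omega) (by norm_num) (by norm_num) (by
          have e : 7 * (w + 1 - 1) + 1 = 7 * (w - 1) + 7 + 1 := by ring
          rw [e, ← hstep]; omega)
        have e : 7 * (w + 1 - 1) + 1 = 7 * (w - 1) + 7 + 1 := by ring
        simp only [e] at hrec
        rw [← hstep] at hrec
        exact hrec
      · have h6 : d ≤ 6 := by
          rcases (by omega : d = 7 ∨ d ≤ 6) with h | h
          · exfalso; apply hc; subst h; constructor <;> decide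
          · exact h
        rw [if_neg hc]
        have hstep : savedB (7 * (w - 1) + d) + (w + d) = savedB (7 * (w - 1) + d + 1) := by
          have h := savedB_succ (7 * (w - 1) + d) (by omega)
          have e1 : (7 * (w - 1) + d) / 7 = w - 1 := by omega
          have e2 : (7 * (w - 1) + d) % 7 = d := by omega
          rw [e1, e2] at h
          omega
        have hrec := ih m w (d + 1) hw (by omega) (by omega) (by
          have e : 7 * (w - 1) + (d + 1) = 7 * (w - 1) + d + 1 := by ring
          rw [e, ← hstep]; omega)
        have e : 7 * (w - 1) + (d + 1) = 7 * (w - 1) + d + 1 := by ring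
        simp only [e] at hrec
        rw [← hstep] at hrec
        exact hrec
    · rw [loopA.eq_def, if_neg hlt, leastD.eq_def, if_pos (by omega)]

theorem gallopB_spec : ∀ (n : ℕ) (m hi : Int) (h : 1 ≤ hi), (m - hi).toNat ≤ n →
    1 ≤ gallopB m hi h ∧ m ≤ savedB (gallopB m hi h) := by
  intro n
  induction n with
  | zero =>
    intro m hi h hn
    have hge : ¬ savedB hi < m := by
      have := savedB_ge_self hi (by omega)
      omega
    rw [gallopB.eq_def, if_neg hge]
    exact ⟨h, by omega⟩
  | succ n ih =>
    intro m hi h hn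
    rw [gallopB.eq_def]
    by_cases hlt : savedB hi < m
    · rw [if_pos hlt]
      have := savedB_ge_self hi (by omega)
      exact ih m (hi * 2) (by omega) (by omega)
    · rw [if_neg hlt]
      exact ⟨h, by omega⟩

theorem bsearchB_spec : ∀ (n : ℕ) (m lo hi : Int), 0 ≤ lo → lo ≤ hi → m ≤ savedB hi →
    (∀ E, 0 ≤ E → E < lo → savedB E < m) → (hi - lo).toNat ≤ n →
    0 ≤ bsearchB m lo hi ∧ m ≤ savedB (bsearchB m lo hi) ∧
      ∀ E, 0 ≤ E → E < bsearchB m lo hi → savedB E < m := by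
  intro n
  induction n with
  | zero =>
    intro m lo hi hlo hlohi hhi hbelow hn
    have heq : lo = hi := by omega
    rw [bsearchB.eq_def, dif_neg (by omega : ¬ lo < hi)]
    exact ⟨hlo, by rw [heq]; exact hhi, hbelow⟩
  | succ n ih =>
    intro m lo hi hlo hlohi hhi hbelow hn
    rw [bsearchB.eq_def]
    by_cases hlt : lo < hi
    · rw [dif_pos hlt]
      have hmid : PySem.Int.floordiv (lo + hi) 2 = (lo + hi) / 2 :=
        PySem.Int.floordiv_eq_ediv_of_pos (by norm_num)
      by_cases hok : m ≤ savedB (PySem.Int.floordiv (lo + hi) 2)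
      · rw [if_pos hok]
        exact ih m lo _ hlo (by omega) hok hbelow (by omega)
      · rw [if_neg hok]
        refine ih m _ hi (by omega) (by omega) hhi ?_ (by omega)
        intro E hE0 hE
        rcases (by omega : E < lo ∨ lo ≤ E) with h | h
        · exact hbelow E hE0 h
        · have hmono := savedB_mono (PySem.Int.floordiv (lo + hi) 2 - E).toNat E
            (PySem.Int.floordiv (lo + hi) 2) hE0 (by omega) (by omega)
          omega
    · rw [dif_neg hlt]
      have heq : lo = hi := by omega
      subst heq
      exact ⟨hlo, hhi, hbelow⟩

theorem leastD_unique : ∀ (n : ℕ) (m D R : Int) (hD : 0 ≤ D), D ≤ R → m ≤ savedB R →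
    (∀ E, D ≤ E → E < R → savedB E < m) → (R - D).toNat ≤ n →
    leastD m D hD = R := by
  intro n
  induction n with
  | zero =>
    intro m D R hD hDR hR hbelow hn
    have : D = R := by omega
    subst this
    rw [leastD.eq_def, if_pos hR]
  | succ n ih =>
    intro m D R hD hDR hR hbelow hn
    rcases (by omega : D = R ∨ D < R) with h | h
    · subst h
      rw [leastD.eq_def, if_pos hR]
    · have hDlt : savedB D < m := hbelow D (by omega) h
      rw [leastD.eq_def, if_neg (by omega)]
      exact ih m (D + 1) R (by omega) (by omega) hR
        (fun E hE1 hE2 => hbelow E (by omega) hE2) (by omega)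

-- ===== VERDICT (by name: the statement is the Claim_ definition above) =====
theorem number_of_days_to_save_spec : Claim_equal_number_of_days_to_save := by
  intro m _
  unfold Spec_number_of_days_to_save number_of_days_to_save number_of_days_to_save_alt
  by_cases h1 : m < 0
  · simp [h1]
  · by_cases h2 : m > 74926
    · simp [h1, h2]
    · rw [if_neg h1, if_neg h2, if_neg (by tauto : ¬ (m < 0 ∨ m > 74926))]
      simp only [decimalpoints_eq_neg_one m]
      rw [if_neg (by norm_num : ¬ (-1 : Int) > 2)]
      have h0 : savedB 0 = 0 := by decide
      have hA : loopA m 0 1 0 (by norm_num) (by norm_num) = leastD m 0 (by norm_num) := by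
        have hb := bridgeA (m - savedB 0).toNat m 1 0 (by norm_num) (by norm_num)
          (by norm_num) (by norm_num)
        simpa [h0] using hb
      rw [hA]
      have hg := gallopB_spec (m - 1).toNat m 1 (by norm_num) (by omega)
      obtain ⟨hg1, hg2⟩ := hg
      have hb := bsearchB_spec (gallopB m 1 (by norm_num) - 0).toNat m 0
        (gallopB m 1 (by norm_num)) (by norm_num) (by omega) hg2
        (fun E hE0 hE => by omega) (by omega)
      obtain ⟨hb0, hb1, hb2⟩ := hb
      exact leastD_unique (bsearchB m 0 (gallopB m 1 (by norm_num)) - 0).toNat m 0 _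
        (by norm_num) hb0 hb1 (fun E hE1 hE2 => hb2 E hE1 hE2) (by omega)
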